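-- pv_equiv track=rewrite | github.com/FadiSaif-BA/Transliteration-Model | src/models/seq2seq_model.py | _extract_consonants
-- ===== SOURCE A (Python) =====
-- def _extract_consonants(text: str) -> list:
--     """Extract consonant letters from English text."""
--     consonants = []
--     skip_next = False
--
--     for i, char in enumerate(text):
--         if skip_next:
--             skip_next = False
--             continue
--
--         if char in 'aeiouAEIOU-':
--             continue  # Skip vowels and hyphens
--
--         # Check for digraphs (Sh, Th, Kh, Gh, Dh)
--         if i < len(text) - 1 and text[i:i + 2] in ['Sh', 'Th', 'Kh', 'Gh', 'Dh', 'sh', 'th', 'kh', 'gh', 'dh']: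
--             consonants.append(text[i:i + 2])
--             skip_next = True
--         else:
--             consonants.append(char)
--
--     return consonants
-- ===== SOURCE B (Python) =====
-- def _extract_consonants(text: str) -> list:
--     """Extract consonant letters from English text."""
--     starts = {i for i, ch in enumerate(text)
--               if ch in 'SsTtKkGgDd' and text[i + 1:i + 2] == 'h'}
--     return [text[i:i + 2] if i in starts else text[i]
--             for i in range(len(text))
--             if i in starts or (i - 1 not in starts and text[i] not in 'aeiouAEIOU-')]
-- ===== Notes on version B (the rewrite author's own statement) =====
-- stated objective: alternative
-- what changed: Replaces A's single stateful scan (skip_next flag plus a 2-char-slice membership test against a 10-string digraph list) by two staged passes: a set comprehension precomputing all digraph start indices (correct because two Xh digraphs can never overlap, the second char 'h' not being a start letter), then a filtered list comprehension over all indices that emits the 2-char slice at start indices, drops indices directly after a start index and vowel/hyphen indices, and emits the single character otherwise.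
import Mathlib
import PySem

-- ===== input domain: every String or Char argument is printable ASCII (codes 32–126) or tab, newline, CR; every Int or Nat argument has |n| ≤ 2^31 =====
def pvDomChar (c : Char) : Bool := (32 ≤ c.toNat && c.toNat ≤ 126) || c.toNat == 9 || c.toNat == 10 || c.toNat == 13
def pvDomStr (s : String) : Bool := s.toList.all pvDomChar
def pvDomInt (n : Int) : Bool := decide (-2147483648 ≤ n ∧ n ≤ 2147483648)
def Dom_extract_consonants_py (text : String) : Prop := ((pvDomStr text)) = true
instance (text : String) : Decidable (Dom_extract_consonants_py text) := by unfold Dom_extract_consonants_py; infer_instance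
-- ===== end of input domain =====

-- B replaces A's single stateful scan (skip_next flag, 10-string digraph list) by two staged
-- passes: a precomputed set of digraph start indices, then a filtered comprehension over all
-- indices that consults that set (objective: alternative).

-- ===== PORT A =====
-- 'aeiouAEIOU-' and the digraph list, as char lists
def pvVowels : List Char := ['a','e','i','o','u','A','E','I','O','U','-']
def pvDigraphs : List (List Char) :=
  [['S','h'],['T','h'],['K','h'],['G','h'],['D','h'],
   ['s','h'],['t','h'],['k','h'],['g','h'],['d','h']]

-- the for-loop over enumerate(text) with state (consonants, skip_next)
def pvAGo (cs : List Char) : List (Int × Char) → List String → Bool → List String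
  | [], acc, _ => acc
  | (i, c) :: rest, acc, skip =>
    if skip then pvAGo cs rest acc false
    else if c ∈ pvVowels then pvAGo cs rest acc skip
    else if i < (cs.length : Int) - 1 ∧ PySem.List.slice cs (some i) (some (i + 2)) ∈ pvDigraphs then
      pvAGo cs rest (acc ++ [String.ofList (PySem.List.slice cs (some i) (some (i + 2)))]) true
    else
      pvAGo cs rest (acc ++ [String.ofList [c]]) skip

def extract_consonants_py (text : String) : List String :=
  pvAGo text.toList (PySem.List.enumerate text.toList 0) [] false

-- ===== PORT B =====
def pvStarts : List Char := ['S','s','T','t','K','k','G','g','D','d']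

-- pass 1: the set comprehension {i for i, ch in enumerate(text) if ch in 'SsTtKkGgDd' and text[i+1:i+2] == 'h'}
def pvBStartsSet (cs : List Char) : PySem.Set Int :=
  (PySem.List.enumerate cs 0).foldl
    (fun s p =>
      if p.2 ∈ pvStarts ∧ PySem.List.slice cs (some (p.1 + 1)) (some (p.1 + 2)) = ['h']
      then PySem.Set.add s p.1 else s)
    PySem.Set.empty

-- pass 2: the list comprehension over range(len(text)) filtered through the set
-- (text[i] on an in-range index i ported as pyGetD with an unused default)
def extract_consonants_py_alt (text : String) : List String :=
  let cs := text.toList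
  let starts := pvBStartsSet cs
  (PySem.List.pyRange 0 (cs.length : Int) 1).foldl
    (fun acc i =>
      if PySem.Set.contains starts i = true ∨
         (¬ PySem.Set.contains starts (i - 1) = true ∧ PySem.List.pyGetD cs i ' ' ∉ pvVowels)
      then acc ++ [if PySem.Set.contains starts i = true
                   then String.ofList (PySem.List.slice cs (some i) (some (i + 2)))
                   else String.ofList [PySem.List.pyGetD cs i ' ']]
      else acc)
    []

-- ===== PRECONDITION & SPEC =====
def Spec_extract_consonants_py (text : String) (out : List String) : Prop := out = extract_consonants_py_alt text
instance (text : String) (out : List String) : Decidable (Spec_extract_consonants_py text out) := by unfold Spec_extract_consonants_py; infer_instance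

-- ===== CLAIM (what is proved, stated in full; the proofs are below) =====
def Claim_equal_extract_consonants_py : Prop := ∀ (text : String), Dom_extract_consonants_py text → Spec_extract_consonants_py text (extract_consonants_py text)

-- ===== LEMMAS AND PROOFS =====

-- "index i starts a digraph": the condition both programs test, as a predicate on the input
def pvD (cs : List Char) (i : Nat) : Prop :=
  ∃ h : i < cs.length, cs[i] ∈ pvStarts ∧ cs[i + 1]? = some 'h'

-- B's step function, named for the proofs (definitionally the lambda in extract_consonants_py_alt)
def pvBStep (cs : List Char) (starts : PySem.Set Int) (acc : List String) (i : Int) : List String :=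
  if PySem.Set.contains starts i = true ∨
     (¬ PySem.Set.contains starts (i - 1) = true ∧ PySem.List.pyGetD cs i ' ' ∉ pvVowels)
  then acc ++ [if PySem.Set.contains starts i = true
               then String.ofList (PySem.List.slice cs (some i) (some (i + 2)))
               else String.ofList [PySem.List.pyGetD cs i ' ']]
  else acc

-- A's cursor view (proof-only helper): the scan that advances 1 or 2 positions
def pvBGo (cs : List Char) (i : Nat) (out : List String) : List String :=
  if h : i < cs.length then
    let ch := cs[i]
    if ch ∈ pvStarts ∧ (cs.drop (i + 1)).take 1 = ['h'] then
      pvBGo cs (i + 2) (out ++ [String.ofList ((cs.drop i).take 2)])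
    else if ch ∉ pvVowels then
      pvBGo cs (i + 1) (out ++ [String.ofList [ch]])
    else
      pvBGo cs (i + 1) out
  else out
termination_by cs.length - i

-- A's digraph slice test, on a two-char prefix, is the start-letter + 'h' test
lemma pvDigraph_iff (c d : Char) : [c, d] ∈ pvDigraphs ↔ c ∈ pvStarts ∧ d = 'h' := by
  simp [pvDigraphs, pvStarts]
  tauto

lemma pvVowel_not_start {c : Char} (h : c ∈ pvVowels) : c ∉ pvStarts := by
  fin_cases h <;> decide

lemma pvTake_one_eq {α : Type} (l : List α) (a : α) : l.take 1 = [a] ↔ l[0]? = some a := by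
  cases l <;> simp

lemma pvDrop_take_one (cs : List Char) (m : Nat) :
    (cs.drop m).take 1 = ['h'] ↔ cs[m]? = some 'h' := by
  rw [pvTake_one_eq, List.getElem?_drop]
  simp

-- pvD, phrased as pvBGo's branch test at an in-range index
lemma pvD_iff (cs : List Char) (i : Nat) (hi : i < cs.length) :
    pvD cs i ↔ (cs[i] ∈ pvStarts ∧ (cs.drop (i + 1)).take 1 = ['h']) := by
  unfold pvD
  rw [pvDrop_take_one]
  exact ⟨fun ⟨_, h⟩ => h, fun h => ⟨hi, h⟩⟩

-- membership in a conditional-add foldl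
lemma pvMem_foldl_addIf (C : Int × Char → Prop) [DecidablePred C] :
    ∀ (l : List (Int × Char)) (s : PySem.Set Int) (y : Int),
      y ∈ l.foldl (fun s p => if C p then PySem.Set.add s p.1 else s) s ↔
        y ∈ s ∨ ∃ p ∈ l, C p ∧ y = p.1 := by
  intro l
  induction l with
  | nil => simp
  | cons p rest ih =>
    intro s y
    simp only [List.foldl_cons, List.mem_cons]
    by_cases hC : C p
    · rw [if_pos hC, ih, PySem.Set.mem_add]
      constructor
      · rintro (⟨hs | he⟩ | ⟨q, hq, hCq, hy⟩)
        · exact Or.inl hs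
        · exact Or.inr ⟨p, Or.inl rfl, hC, he⟩
        · exact Or.inr ⟨q, Or.inr hq, hCq, hy⟩
      · rintro (hs | ⟨q, (rfl | hq), hCq, hy⟩)
        · exact Or.inl (Or.inl hs)
        · exact Or.inl (Or.inr hy)
        · exact Or.inr ⟨q, hq, hCq, hy⟩
    · rw [if_neg hC, ih]
      constructor
      · rintro (hs | ⟨q, hq, hCq, hy⟩)
        · exact Or.inl hs
        · exact Or.inr ⟨q, Or.inr hq, hCq, hy⟩
      · rintro (hs | ⟨q, (rfl | hq), hCq, hy⟩)
        · exact Or.inl hs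
        · exact absurd hCq hC
        · exact Or.inr ⟨q, hq, hCq, hy⟩

-- the slice text[k+1:k+2] on a natural index
lemma pvSlice_succ (cs : List Char) (k : Nat) :
    PySem.List.slice cs (some ((k : Int) + 1)) (some ((k : Int) + 2)) = (cs.drop (k + 1)).take 1 := by
  have h1 : ((k : Int) + 1) = ((k + 1 : Nat) : Int) := by push_cast; ring
  have h2 : ((k : Int) + 2) = (((k + 1 : Nat) : Int) + ((1 : Nat) : Int)) := by push_cast; ring
  rw [h1, h2, PySem.List.slice_natCast_add]

-- what the precomputed set contains: exactly the digraph start indices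
lemma pvContains_startsSet (cs : List Char) (j : Int) :
    PySem.Set.contains (pvBStartsSet cs) j = true ↔ ∃ k : Nat, j = (k : Int) ∧ pvD cs k := by
  unfold pvBStartsSet
  rw [PySem.Set.contains_iff,
      pvMem_foldl_addIf (fun p => p.2 ∈ pvStarts ∧ PySem.List.slice cs (some (p.1 + 1)) (some (p.1 + 2)) = ['h'])]
  simp only [PySem.Set.empty, List.not_mem_nil, false_or]
  constructor
  · rintro ⟨p, hp, hC, hy⟩
    rw [PySem.List.mem_enumerate_iff] at hp
    obtain ⟨k, hk, rfl⟩ := hp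
    simp only [zero_add] at hC hy
    refine ⟨k, hy, hk, hC.1, ?_⟩
    have := hC.2
    rw [pvSlice_succ, pvDrop_take_one] at this
    exact this
  · rintro ⟨k, rfl, hk, hs, hh⟩
    refine ⟨((k : Int), cs[k]), ?_, ⟨hs, ?_⟩, rfl⟩
    · rw [PySem.List.mem_enumerate_iff]
      exact ⟨k, hk, by simp⟩
    · rw [pvSlice_succ, pvDrop_take_one]
      exact hh

lemma pvContains_startsSet_nat (cs : List Char) (k : Nat) :
    PySem.Set.contains (pvBStartsSet cs) (k : Int) = true ↔ pvD cs k := by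
  rw [pvContains_startsSet]
  constructor
  · rintro ⟨m, hm, hD⟩
    have : k = m := by exact_mod_cast hm
    exact this ▸ hD
  · exact fun h => ⟨k, rfl, h⟩

lemma pvContains_startsSet_neg_one (cs : List Char) :
    PySem.Set.contains (pvBStartsSet cs) (-1) = false := by
  rw [Bool.eq_false_iff]
  intro h
  rw [pvContains_startsSet] at h
  obtain ⟨k, hk, _⟩ := h
  omega

-- main loop correspondence A-side: from position i, A's enumerate loop agrees with the cursor view
lemma pvMain : ∀ (n : Nat) (cs t : List Char) (i : Nat) (acc : List String),
    cs.length - i ≤ n → cs.drop i = t →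
    pvAGo cs (PySem.List.enumerate t (i : Int)) acc false = pvBGo cs i acc := by
  intro n
  induction n with
  | zero =>
    intro cs t i acc hn ht
    have hlen : cs.length ≤ i := by omega
    have : t = [] := by rw [← ht]; exact List.drop_eq_nil_of_le hlen
    subst this
    rw [pvBGo]
    simp [PySem.List.enumerate, pvAGo, Nat.not_lt.mpr hlen]
  | succ n ih =>
    intro cs t i acc hn ht
    match t with
    | [] =>
      have hlen : cs.length ≤ i := by
        by_contra hlt
        have := congrArg List.length ht
        simp [List.length_drop] at this
        omega
      rw [pvBGo]
      simp [PySem.List.enumerate, pvAGo, Nat.not_lt.mpr hlen]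
    | c :: rest =>
      have hi : i < cs.length := by
        by_contra hlt
        rw [List.drop_eq_nil_of_le (by omega)] at ht
        simp at ht
      have hgetc : cs[i] = c := by
        have : (cs.drop i)[0]'(by rw [ht]; simp) = c := by simp [ht]
        simpa using this
      have hdrop1 : cs.drop (i + 1) = rest := by
        have : (cs.drop i).drop 1 = rest := by rw [ht]; simp
        simpa [List.drop_drop] using this
      have hlen' : cs.length - i = rest.length + 1 := by
        have := congrArg List.length ht
        simp [List.length_drop] at this
        omega
      have hslice : PySem.List.slice cs (some (i : Int)) (some ((i : Int) + 2)) = c :: rest.take 1 := by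
        have h2 : ((i : Int) + 2) = ((i : Int) + ((2 : Nat) : Int)) := by norm_num
        rw [h2, PySem.List.slice_natCast_add, ht]
        rfl
      rw [PySem.List.enumerate_cons, pvAGo, pvBGo]
      rw [if_neg (show ¬((false : Bool) = true) by simp)]
      rw [dif_pos hi]
      simp only [hgetc, hdrop1]
      by_cases hv : c ∈ pvVowels
      · -- vowel/hyphen: both skip; the digraph branch cannot fire
        have hnd : ¬(c ∈ pvStarts ∧ rest.take 1 = ['h']) :=
          fun h => pvVowel_not_start hv h.1
        rw [if_pos hv, if_neg hnd, if_neg (not_not_intro hv),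
            (by push_cast; ring : ((i : Int) + 1) = ((i + 1 : Nat) : Int))]
        exact ih cs rest (i + 1) acc (by omega) hdrop1
      · rw [if_neg hv]
        by_cases hd : c ∈ pvStarts ∧ rest.take 1 = ['h']
        · -- digraph: A consumes via skip flag, the cursor advances by 2
          obtain ⟨hs, hh⟩ := hd
          match rest, hh, hdrop1, hlen', hslice with
          | d :: rest', hh, hdrop1, hlen', hslice =>
            have hd' : d = 'h' := by simpa using hh
            have htk : (d :: rest').take 1 = [d] := by simp
            have hcond : (i : Int) < (cs.length : Int) - 1 ∧
                PySem.List.slice cs (some (i : Int)) (some ((i : Int) + 2)) ∈ pvDigraphs := by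
              have h2 : 2 ≤ cs.length - i := by rw [hlen']; simp
              refine ⟨by omega, ?_⟩
              rw [hslice, htk]
              exact (pvDigraph_iff c d).mpr ⟨hs, hd'⟩
            rw [if_pos hcond, if_pos ⟨hs, hh⟩]
            have hdrop2 : cs.drop (i + 2) = rest' := by
              have : (cs.drop (i + 1)).drop 1 = rest' := by rw [hdrop1]; simp
              simpa [List.drop_drop] using this
            have htake : (cs.drop i).take 2 = c :: d :: [] := by
              rw [ht]; simp [hd']
            rw [PySem.List.enumerate_cons, pvAGo, if_pos rfl, hslice, htake, htk]
            rw [(by push_cast; ring : ((i : Int) + 1 + 1) = ((i + 2 : Nat) : Int)), hd']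
            exact ih cs rest' (i + 2) _ (by omega) hdrop2
        · -- plain consonant: both emit the single char and advance by 1
          have hcond : ¬((i : Int) < (cs.length : Int) - 1 ∧
              PySem.List.slice cs (some (i : Int)) (some ((i : Int) + 2)) ∈ pvDigraphs) := by
            rintro ⟨hlt, hmem⟩
            rw [hslice] at hmem
            match rest, hmem with
            | [], hmem => simp [pvDigraphs] at hmem
            | d :: rest', hmem =>
              rw [show (d :: rest').take 1 = [d] by simp] at hmem
              have := (pvDigraph_iff c d).mp hmem
              exact hd ⟨this.1, by simp [this.2]⟩
          rw [if_neg hcond, if_neg hd, if_pos hv,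
              (by push_cast; ring : ((i : Int) + 1) = ((i + 1 : Nat) : Int))]
          exact ih cs rest (i + 1) _ (by omega) hdrop1

-- main loop correspondence B-side: the cursor view equals B's filtered range fold,
-- under the invariant that the position just before the cursor is not a digraph start
lemma pvMain2 : ∀ (n : Nat) (cs : List Char) (i : Nat) (out : List String),
    cs.length - i ≤ n → (i = 0 ∨ ¬ pvD cs (i - 1)) →
    pvBGo cs i out =
      (PySem.List.pyRange (i : Int) (cs.length : Int) 1).foldl (pvBStep cs (pvBStartsSet cs)) out := by
  intro n
  induction n with
  | zero =>
    intro cs i out hn _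
    have hlen : cs.length ≤ i := by omega
    rw [pvBGo, dif_neg (Nat.not_lt.mpr hlen),
        PySem.List.pyRange_one_eq_nil (by exact_mod_cast hlen)]
    rfl
  | succ n ih =>
    intro cs i out hn hinv
    by_cases hi : i < cs.length
    · rw [PySem.List.pyRange_one_cons (by exact_mod_cast hi), List.foldl_cons]
      rw [pvBGo, dif_pos hi]
      have hgetD : PySem.List.pyGetD cs (i : Int) ' ' = cs[i] := by
        simp [PySem.List.pyGetD, PySem.List.pyGet?, PySem.List.pyIdx?, hi]
      have hciff := pvContains_startsSet_nat cs i
      have hprev : PySem.Set.contains (pvBStartsSet cs) ((i : Int) - 1) = false := by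
        rcases hinv with rfl | hnd
        · simpa using pvContains_startsSet_neg_one cs
        · rcases Nat.eq_zero_or_pos i with rfl | hpos
          · simpa using pvContains_startsSet_neg_one cs
          · have : ((i : Int) - 1) = ((i - 1 : Nat) : Int) := by omega
            rw [this, Bool.eq_false_iff]
            intro h
            exact hnd ((pvContains_startsSet_nat cs (i - 1)).mp h)
      by_cases hD : pvD cs i
      · -- digraph start: both emit the two-char slice; the next index is filtered out
        have hc : PySem.Set.contains (pvBStartsSet cs) (i : Int) = true := hciff.mpr hD
        obtain ⟨_, hs, hh⟩ := hD
        have hlt1 : i + 1 < cs.length := (List.getElem?_eq_some_iff.mp hh).1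
        rw [if_pos ((pvD_iff cs i hi).mp ⟨hi, hs, hh⟩)]
        have hslice : PySem.List.slice cs (some (i : Int)) (some ((i : Int) + 2)) = (cs.drop i).take 2 := by
          have h2 : ((i : Int) + 2) = ((i : Int) + ((2 : Nat) : Int)) := by norm_num
          rw [h2, PySem.List.slice_natCast_add]
        have hstep0 : pvBStep cs (pvBStartsSet cs) out (i : Int) =
            out ++ [String.ofList ((cs.drop i).take 2)] := by
          unfold pvBStep
          rw [hc, hslice]
          simp
        rw [hstep0]
        -- the element at i+1 is skipped by the filter
        have hlt1' : ((i : Int) + 1) < (cs.length : Int) := by exact_mod_cast hlt1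
        rw [PySem.List.pyRange_one_cons hlt1', List.foldl_cons]
        have hnext : pvBStep cs (pvBStartsSet cs) (out ++ [String.ofList ((cs.drop i).take 2)]) ((i : Int) + 1) =
            out ++ [String.ofList ((cs.drop i).take 2)] := by
          unfold pvBStep
          have hcast1 : ((i : Int) + 1) = ((i + 1 : Nat) : Int) := by push_cast; ring
          have hc1 : PySem.Set.contains (pvBStartsSet cs) ((i : Int) + 1) = false := by
            rw [hcast1, Bool.eq_false_iff]
            intro h
            obtain ⟨_, hs', _⟩ := (pvContains_startsSet_nat cs (i + 1)).mp h
            have : cs[i + 1] = 'h' := by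
              have := List.getElem?_eq_some_iff.mp hh
              exact this.2
            rw [this] at hs'
            simp [pvStarts] at hs'
          have hcp : PySem.Set.contains (pvBStartsSet cs) ((i : Int) + 1 - 1) = true := by
            simpa using hc
          rw [hc1, hcp]
          simp
        rw [hnext]
        have hcast2 : ((i : Int) + 1 + 1) = ((i + 2 : Nat) : Int) := by push_cast; ring
        rw [hcast2]
        refine ih cs (i + 2) _ (by omega) (Or.inr ?_)
        intro hD1
        obtain ⟨_, hs', _⟩ := hD1
        have hs2 : cs[i + 1]'hlt1 ∈ pvStarts := hs'
        have hch : cs[i + 1]'hlt1 = 'h' := (List.getElem?_eq_some_iff.mp hh).2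
        rw [hch] at hs2
        simp [pvStarts] at hs2
      · -- not a digraph start
        have hc : PySem.Set.contains (pvBStartsSet cs) (i : Int) = false := by
          rw [Bool.eq_false_iff]; intro h; exact hD (hciff.mp h)
        rw [if_neg (fun h => hD ((pvD_iff cs i hi).mpr h))]
        have hcast1 : ((i : Int) + 1) = ((i + 1 : Nat) : Int) := by push_cast; ring
        by_cases hv : cs[i] ∈ pvVowels
        · -- vowel/hyphen: both skip
          rw [if_neg (not_not_intro hv)]
          have hstep : pvBStep cs (pvBStartsSet cs) out (i : Int) = out := by
            unfold pvBStep
            rw [hc, hgetD]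
            simp [hv]
          rw [hstep, hcast1]
          exact ih cs (i + 1) out (by omega) (Or.inr (by simpa using hD))
        · -- plain consonant: both emit the single char
          rw [if_pos hv]
          have hstep : pvBStep cs (pvBStartsSet cs) out (i : Int) = out ++ [String.ofList [cs[i]]] := by
            unfold pvBStep
            rw [hc, hprev, hgetD]
            simp [hv]
          rw [hstep, hcast1]
          exact ih cs (i + 1) _ (by omega) (Or.inr (by simpa using hD))
    · rw [pvBGo, dif_neg hi,
          PySem.List.pyRange_one_eq_nil (by exact_mod_cast Nat.not_lt.mp hi)]
      rfl

-- ===== VERDICT (by name: the statement is the Claim_ definition above) =====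
theorem extract_consonants_py_spec : Claim_equal_extract_consonants_py := by
  intro text _
  unfold Spec_extract_consonants_py extract_consonants_py extract_consonants_py_alt
  have h1 := pvMain text.toList.length text.toList text.toList 0 [] (by omega) (by simp)
  have h2 := pvMain2 text.toList.length text.toList 0 [] (by omega) (Or.inl rfl)
  simp only [Nat.cast_zero] at h1 h2
  rw [h1, h2]
  rfl
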